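-- pv_equiv track=rewrite | github.com/AngryWeather/AdventOfCode2015 | day11/day_11.py | has_consecutive_characters
-- ===== SOURCE A (Python) =====
-- def has_consecutive_characters(word):
--     for i in range(len(word)):
--         chunk = word[i : i + 3]
--         for index, j in enumerate(chunk):
--             if index + 2 >= len(chunk):
--                 continue
--             elif (
--                 ord(chunk[index]) - ord(chunk[index + 1]) == -1
--                 and ord(chunk[index + 1]) - ord(chunk[index + 2]) == -1
--             ):
--                 return True
--     return False
-- ===== SOURCE B (Python) =====
-- def has_consecutive_characters(word):
--     codes = [ord(c) for c in word]
--     diffs = [b - a for a, b in zip(codes, codes[1:])]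
--     return any(d1 == 1 and d2 == 1 for d1, d2 in zip(diffs, diffs[1:]))
-- ===== Notes on version B (the rewrite author's own statement) =====
-- stated objective: simpler
-- what changed: Replaces A's nested loops (a 3-character window sliced at every index and re-scanned with enumerate and guards) by building the table of adjacent ord-differences once and scanning adjacent pairs of that table for (1, 1).
import Mathlib
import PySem

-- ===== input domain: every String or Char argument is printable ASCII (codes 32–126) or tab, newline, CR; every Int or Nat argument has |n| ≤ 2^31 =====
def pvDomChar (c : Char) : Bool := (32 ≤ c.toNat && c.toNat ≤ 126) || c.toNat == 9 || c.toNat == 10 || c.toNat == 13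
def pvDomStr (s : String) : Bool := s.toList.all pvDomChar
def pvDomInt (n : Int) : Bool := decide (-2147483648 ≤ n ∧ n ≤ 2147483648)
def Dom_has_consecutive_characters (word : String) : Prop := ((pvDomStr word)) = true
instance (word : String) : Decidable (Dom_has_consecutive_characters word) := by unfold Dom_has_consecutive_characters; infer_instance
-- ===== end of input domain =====

-- B builds the table of adjacent ord-differences once and scans adjacent pairs of it for (1,1),
-- instead of A's slice-a-3-window-at-every-index-and-rescan-it loops; objective: simpler.


-- ===== PORT A =====
-- inner loop: 'for index, j in enumerate(chunk): if index+2 >= len(chunk): continue elif … : return True'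
def hccChunkScan (chunk : List Char) : Bool :=
  (PySem.List.enumerate chunk).any fun p =>
    if p.1 + 2 ≥ (chunk.length : Int) then false
    else
      match PySem.List.pyGet? chunk p.1, PySem.List.pyGet? chunk (p.1 + 1), PySem.List.pyGet? chunk (p.1 + 2) with
      | some a, some b, some c =>
          ((a.toNat : Int) - (b.toNat : Int) == -1) && ((b.toNat : Int) - (c.toNat : Int) == -1)
      | _, _, _ => false

-- outer loop: 'for i in range(len(word)): chunk = word[i:i+3]; …; return False'
def hccOuter (cs : List Char) (i : Nat) : Bool :=
  if i < cs.length then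
    (if hccChunkScan (PySem.List.slice cs (some (i : Int)) (some ((i : Int) + 3))) then true
     else hccOuter cs (i + 1))
  else false
termination_by cs.length - i

def has_consecutive_characters (word : String) : Bool := hccOuter word.toList 0

-- ===== PORT B =====
def has_consecutive_characters_alt (word : String) : Bool :=
  let codes := word.toList.map (fun c => (c.toNat : Int))
  let diffs := (codes.zip codes.tail).map (fun p => p.2 - p.1)
  (diffs.zip diffs.tail).any fun p => p.1 == 1 && p.2 == 1

-- ===== PRECONDITION & SPEC =====
def Spec_has_consecutive_characters (word : String) (out : Bool) : Prop := out = has_consecutive_characters_alt word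
instance (word : String) (out : Bool) : Decidable (Spec_has_consecutive_characters word out) := by unfold Spec_has_consecutive_characters; infer_instance

-- ===== CLAIM (what is proved, stated in full; the proofs are below) =====
def Claim_equal_has_consecutive_characters : Prop := ∀ (word : String), Dom_has_consecutive_characters word → Spec_has_consecutive_characters word (has_consecutive_characters word)

-- ===== LEMMAS AND PROOFS =====

/-- canonical form: some position starts an increasing-by-one triple -/
def trip : List Char → Bool
  | a :: b :: c :: rest =>
      (((a.toNat : Int) - (b.toNat : Int) == -1) && ((b.toNat : Int) - (c.toNat : Int) == -1))
      || trip (b :: c :: rest)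
  | _ => false

def headCheck : List Char → Bool
  | a :: b :: c :: _ =>
      ((a.toNat : Int) - (b.toNat : Int) == -1) && ((b.toNat : Int) - (c.toNat : Int) == -1)
  | _ => false

lemma trip_step (l : List Char) : trip l = (headCheck l || trip l.tail) := by
  match l with
  | [] => simp [trip, headCheck]
  | [a] => simp [trip, headCheck]
  | [a, b] => simp [trip, headCheck]
  | a :: b :: c :: r => simp [trip, headCheck]

lemma chunkScan_take (l : List Char) : hccChunkScan (l.take 3) = headCheck l := by
  match l with
  | [] => decide
  | [a] =>
      simp [hccChunkScan, headCheck, PySem.List.enumerate]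
  | [a, b] =>
      simp [hccChunkScan, headCheck, PySem.List.enumerate]
  | a :: b :: c :: r =>
      simp [hccChunkScan, headCheck, PySem.List.enumerate, PySem.List.pyGet?, PySem.List.pyIdx?]

lemma outer_eq_trip (cs : List Char) (i : Nat) : hccOuter cs i = trip (cs.drop i) := by
  by_cases h : i < cs.length
  · rw [hccOuter]
    simp only [h, if_true]
    have hslice : PySem.List.slice cs (some (i : Int)) (some ((i : Int) + 3))
        = (cs.drop i).take 3 := by
      have := PySem.List.slice_natCast (xs := cs) (a := i) (b := i + 3)
      have hc : ((i + 3 : Nat) : Int) = (i : Int) + 3 := by push_cast; ring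
      rw [← hc, this]
      simp
    rw [hslice, chunkScan_take, outer_eq_trip cs (i + 1), trip_step (cs.drop i)]
    have : cs.drop (i + 1) = (cs.drop i).tail := by
      rw [List.tail_drop]
    rw [this]
    cases headCheck (cs.drop i) <;> simp
  · rw [hccOuter]
    simp only [h, if_false]
    have : cs.drop i = [] := List.drop_eq_nil_of_le (by omega)
    rw [this]; rfl
termination_by cs.length - i

lemma negflip (x y : Int) : ((y - x == (1 : Int)) = (x - y == (-1 : Int))) := by
  rcases eq_or_ne (y - x) 1 with h | h
  · have h' : x - y = -1 := by omega
    simp [h, h']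
  · have h' : x - y ≠ -1 := by omega
    simp [h, h']

def altList (cs : List Char) : Bool :=
  let codes := cs.map (fun c => (c.toNat : Int))
  let diffs := (codes.zip codes.tail).map (fun p => p.2 - p.1)
  (diffs.zip diffs.tail).any fun p => p.1 == 1 && p.2 == 1

lemma altList_eq_trip (cs : List Char) : altList cs = trip cs := by
  match cs with
  | [] => decide
  | [a] => simp [altList, trip]
  | [a, b] => simp [altList, trip]
  | a :: b :: c :: r =>
      have ih := altList_eq_trip (b :: c :: r)
      simp only [altList, List.map_cons, List.tail_cons, List.zip_cons_cons, List.any_cons] at ih ⊢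
      rw [ih]
      simp only [trip]
      rw [negflip (a.toNat : Int) (b.toNat : Int), negflip (b.toNat : Int) (c.toNat : Int)]

-- ===== VERDICT (by name: the statement is the Claim_ definition above) =====
theorem has_consecutive_characters_spec : Claim_equal_has_consecutive_characters := by
  intro word _
  unfold Spec_has_consecutive_characters has_consecutive_characters has_consecutive_characters_alt
  rw [outer_eq_trip word.toList 0]
  simpa [altList] using (altList_eq_trip word.toList).symm
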